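-- pv_equiv track=rewrite | github.com/Luka-stack/daily_challange | problems1-10/problem9.py | count_sum_inc
-- ===== SOURCE A (Python) =====
-- def count_sum_inc(arry):
-- 	maxi = 0
-- 	length = len(arry)
-- 	for i in range(length):
-- 		total = arry[i]
-- 		step = 0
-- 		for j in range(2, length):
-- 			if i + j + step <= length - 1:
-- 				total += arry[i+j+step]
-- 			if i - (j + step) >= 0:
-- 				total += arry[i-(j + step)]
-- 			step += j + 1
-- 		if total > maxi:
-- 			maxi = total
--
-- 	return maxi
-- ===== SOURCE B (Python) =====
-- def count_sum_inc(arry):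
--     n = len(arry)
--     # precompute the quadratically-spaced offsets once (2, 6, 11, 17, ...)
--     offsets = []
--     d, inc = 2, 4
--     while d <= n - 1:
--         offsets.append(d)
--         d += inc
--         inc += 1
--     # offset-major accumulation: one pass over the array per useful offset
--     totals = list(arry)
--     for d in offsets:
--         totals = [totals[i]
--                   + (arry[i + d] if i + d < n else 0)
--                   + (arry[i - d] if i - d >= 0 else 0)
--                   for i in range(n)]
--     best = 0
--     for t in totals:
--         if t > best:
--             best = t
--     return best
-- ===== Notes on version B (the rewrite author's own statement) =====
-- stated objective: faster
-- what changed: B precomputes the quadratically-spaced offset list (2, 6, 11, 17, ...) once with a while-loop and accumulates offset-major into a totals array (one array pass per useful offset), instead of A's i-major nested loop that re-derives every offset via a step accumulator for each i and iterates the full inner range even when offsets exceed the array.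
import Mathlib
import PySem

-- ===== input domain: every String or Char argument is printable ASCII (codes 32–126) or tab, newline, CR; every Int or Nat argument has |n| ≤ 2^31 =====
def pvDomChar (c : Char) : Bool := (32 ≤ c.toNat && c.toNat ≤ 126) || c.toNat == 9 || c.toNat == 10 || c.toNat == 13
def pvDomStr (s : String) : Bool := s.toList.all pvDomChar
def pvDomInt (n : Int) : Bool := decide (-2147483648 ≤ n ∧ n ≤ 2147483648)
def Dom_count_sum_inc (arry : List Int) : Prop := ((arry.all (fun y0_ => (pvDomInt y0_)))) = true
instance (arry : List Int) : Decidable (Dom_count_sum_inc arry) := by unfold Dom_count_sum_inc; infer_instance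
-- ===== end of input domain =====

-- B precomputes the quadratically-spaced offsets once and accumulates offset-major
-- over a totals array, replacing A's O(n^2) i-major loop by an O(n*sqrt(n)) pass (faster).

-- ===== PORT A =====
-- inner loop body of A: state (total, step), loop variable j
def pvAInner (arry : List Int) (length i : Int) (ts : Int × Int) (j : Int) : Int × Int :=
  let total := ts.1
  let step := ts.2
  let total := if i + j + step ≤ length - 1 then total + PySem.List.pyGetD arry (i + j + step) 0 else total
  let total := if i - (j + step) ≥ 0 then total + PySem.List.pyGetD arry (i - (j + step)) 0 else total
  (total, step + (j + 1))

def count_sum_inc (arry : List Int) : Int :=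
  let length : Int := arry.length
  (PySem.List.pyRange 0 length 1).foldl (fun maxi i =>
    let r := (PySem.List.pyRange 2 length 1).foldl (pvAInner arry length i)
               (PySem.List.pyGetD arry i 0, 0)
    if r.1 > maxi then r.1 else maxi) 0

-- ===== PORT B =====
-- the `while d <= n-1` loop building the offset list (2, 6, 11, 17, ...);
-- the conjunct 1 ≤ inc is a totality guard only (inc starts at 4 and grows)
def pvMkOffsets (nm1 d inc : Int) : List Int :=
  if h : d ≤ nm1 ∧ 1 ≤ inc then d :: pvMkOffsets nm1 (d + inc) (inc + 1) else []
termination_by (nm1 + 1 - d).toNat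
decreasing_by omega

-- one offset-major pass: rebuild totals from the previous totals and arry
def pvBStep (arry : List Int) (n : Int) (totals : List Int) (d : Int) : List Int :=
  (PySem.List.pyRange 0 n 1).map (fun i =>
    PySem.List.pyGetD totals i 0
    + (if i + d < n then PySem.List.pyGetD arry (i + d) 0 else 0)
    + (if i - d ≥ 0 then PySem.List.pyGetD arry (i - d) 0 else 0))

def count_sum_inc_alt (arry : List Int) : Int :=
  let n : Int := arry.length
  let offsets := pvMkOffsets (n - 1) 2 4
  let totals := offsets.foldl (pvBStep arry n) arry
  totals.foldl (fun best t => if t > best then t else best) 0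

-- ===== PRECONDITION & SPEC =====
def Spec_count_sum_inc (arry : List Int) (out : Int) : Prop := out = count_sum_inc_alt arry
instance (arry : List Int) (out : Int) : Decidable (Spec_count_sum_inc arry out) := by unfold Spec_count_sum_inc; infer_instance

-- ===== CLAIM (what is proved, stated in full; the proofs are below) =====
def Claim_equal_count_sum_inc : Prop := ∀ (arry : List Int), Dom_count_sum_inc arry → Spec_count_sum_inc arry (count_sum_inc arry)

-- ===== LEMMAS AND PROOFS =====

-- the offset sequence both programs walk: 2, 6, 11, 17, ... (increments 4, 5, 6, ...)
def pvSeq : Nat → Int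
  | 0 => 2
  | t+1 => pvSeq t + (t + 4)

-- the two guarded additions contributed by one offset d at index i
def pvContrib (arry : List Int) (n i d : Int) : Int :=
  (if i + d < n then PySem.List.pyGetD arry (i + d) 0 else 0)
  + (if i - d ≥ 0 then PySem.List.pyGetD arry (i - d) 0 else 0)

lemma pvSeq_lb (t : Nat) : (t : Int) + 2 ≤ pvSeq t := by
  induction t with
  | zero => simp [pvSeq]
  | succ t ih => simp only [pvSeq]; push_cast; omega

lemma pvSeq_mono (t u : Nat) : pvSeq t ≤ pvSeq (t + u) := by
  induction u with
  | zero => simp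
  | succ u ih => rw [show t + (u+1) = (t+u) + 1 by omega]; simp only [pvSeq]; push_cast; omega

lemma pvContrib_zero (arry : List Int) (n i d : Int)
    (hi : 0 ≤ i) (hin : i < n) (hd : n ≤ d) : pvContrib arry n i d = 0 := by
  unfold pvContrib
  rw [if_neg (by omega), if_neg (by omega)]; ring
lemma pvB_totals (arry : List Int) (n : Int) (L : List Int) (g : Int → Int) :
    L.foldl (pvBStep arry n) ((PySem.List.pyRange 0 n 1).map g)
    = (PySem.List.pyRange 0 n 1).map (fun i => g i + (L.map (pvContrib arry n i)).sum) := by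
  induction L generalizing g with
  | nil => simp
  | cons d L ih =>
    rw [List.foldl_cons]
    have hstep : pvBStep arry n ((PySem.List.pyRange 0 n 1).map g) d
        = (PySem.List.pyRange 0 n 1).map (fun i => g i + pvContrib arry n i d) := by
      unfold pvBStep
      apply List.map_congr_left
      intro i hi
      rw [PySem.List.mem_pyRange_one] at hi
      rw [PySem.List.pyGetD_map_pyRange_of_nonneg g n i 0 hi.1 hi.2]
      unfold pvContrib; ring
    rw [hstep, ih]
    apply List.map_congr_left
    intro i _
    simp only [List.map_cons, List.sum_cons]
    ring

lemma pvOffsets_sum (arry : List Int) (n i : Int) (hi : 0 ≤ i) (hin : i < n)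
    (k t : Nat) (hk : n - 1 < pvSeq (t + k)) :
    ((pvMkOffsets (n-1) (pvSeq t) ((t:Int)+4)).map (pvContrib arry n i)).sum
    = ((List.range k).map (fun u => pvContrib arry n i (pvSeq (t+u)))).sum := by
  induction k generalizing t with
  | zero =>
    rw [pvMkOffsets, dif_neg (by simp at hk ⊢; omega)]
    simp
  | succ k ih =>
    by_cases h : pvSeq t ≤ n - 1
    · rw [pvMkOffsets, dif_pos ⟨h, by omega⟩]
      have e1 : pvSeq t + ((t:Int) + 4) = pvSeq (t+1) := by simp only [pvSeq]
      have e2 : (t:Int) + 4 + 1 = ((t+1 : Nat) : Int) + 4 := by push_cast; ring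
      rw [e1, e2, List.map_cons, List.sum_cons,
        ih (t+1) (by rw [show t+1+k = t+(k+1) by omega]; exact hk)]
      rw [List.range_succ_eq_map, List.map_cons, List.sum_cons, List.map_map]
      congr 1
      apply congrArg
      apply List.map_congr_left
      intro u _
      simp only [Function.comp, Nat.succ_eq_add_one]
      rw [show t + (u+1) = t+1+u by omega]
    · rw [pvMkOffsets, dif_neg (by omega)]
      symm
      simp only [List.map_nil, List.sum_nil]
      apply List.sum_eq_zero
      intro x hx
      simp only [List.mem_map, List.mem_range] at hx
      obtain ⟨u, _, rfl⟩ := hx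
      exact pvContrib_zero arry n i _ hi hin (by have := pvSeq_mono t u; omega)

lemma pvA_inner_eq (arry : List Int) (n i : Int) (k t : Nat) (total : Int)
    (hk : (n - ((t : Int) + 2)).toNat = k) :
    ((PySem.List.pyRange ((t:Int)+2) n 1).foldl (pvAInner arry n i) (total, pvSeq t - ((t:Int)+2))).1
    = total + ((List.range k).map (fun u => pvContrib arry n i (pvSeq (t+u)))).sum := by
  induction k generalizing t total with
  | zero =>
    rw [PySem.List.pyRange_one_eq_nil (by omega)]
    simp
  | succ k ih =>
    rw [PySem.List.pyRange_one_cons (by omega), List.foldl_cons]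
    have hstate : pvAInner arry n i (total, pvSeq t - ((t:Int)+2)) ((t:Int)+2)
        = (total + pvContrib arry n i (pvSeq t), pvSeq (t+1) - (((t+1:Nat):Int)+2)) := by
      unfold pvAInner pvContrib
      simp only
      have e1 : i + ((t:Int)+2) + (pvSeq t - ((t:Int)+2)) = i + pvSeq t := by ring
      have e2 : i - (((t:Int)+2) + (pvSeq t - ((t:Int)+2))) = i - pvSeq t := by ring
      rw [e1, e2]
      rw [show (ite (i + pvSeq t ≤ n - 1) (total + PySem.List.pyGetD arry (i + pvSeq t) 0) total)
            = ite (i + pvSeq t < n) (total + PySem.List.pyGetD arry (i + pvSeq t) 0) total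
          from if_congr (by omega) rfl rfl]
      refine Prod.ext ?_ ?_
      · simp only; split_ifs <;> ring
      · simp only [pvSeq]; push_cast; ring
    rw [hstate]
    have e3 : ((t:Int)+2) + 1 = ((t+1:Nat):Int)+2 := by push_cast; ring
    rw [e3, ih (t+1) _ (by push_cast at hk ⊢; omega)]
    rw [List.range_succ_eq_map, List.map_cons, List.sum_cons, List.map_map]
    have e4 : ((List.range k).map ((fun u => pvContrib arry n i (pvSeq (t+u))) ∘ Nat.succ))
        = (List.range k).map (fun u => pvContrib arry n i (pvSeq (t+1+u))) := by
      apply List.map_congr_left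
      intro u _
      simp only [Function.comp, Nat.succ_eq_add_one]
      rw [show t + (u+1) = t+1+u by omega]
    rw [e4]
    simp only [Nat.add_zero]
    ring

-- ===== VERDICT (by name: the statement is the Claim_ definition above) =====
theorem count_sum_inc_spec : Claim_equal_count_sum_inc := by
  intro arry _
  unfold Spec_count_sum_inc count_sum_inc count_sum_inc_alt
  simp only
  have h0 : (PySem.List.pyRange 0 (arry.length:Int) 1).map (fun j => PySem.List.pyGetD arry j 0) = arry :=
    PySem.List.map_pyGetD_pyRange_zero' arry 0
  have hB := pvB_totals arry (arry.length:Int) (pvMkOffsets ((arry.length:Int)-1) 2 4)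
    (fun j => PySem.List.pyGetD arry j 0)
  rw [h0] at hB
  rw [hB, List.foldl_map]
  apply PySem.List.foldl_congr_mem
  intro acc x hx
  rw [PySem.List.mem_pyRange_one] at hx
  have hA := pvA_inner_eq arry (arry.length:Int) x ((arry.length:Int)-2).toNat 0
      (PySem.List.pyGetD arry x 0) (by norm_num)
  norm_num [pvSeq] at hA
  rw [hA]
  have hS := pvOffsets_sum arry (arry.length:Int) x hx.1 hx.2 ((arry.length:Int)-2).toNat 0
      (by have := pvSeq_lb ((arry.length:Int)-2).toNat; rw [Nat.zero_add]; omega)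
  norm_num [pvSeq] at hS
  rw [hS]
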